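-- pv_equiv track=rewrite | github.com/VanshGosavi07/trial | agents/query_agent.py | _pick_best_table
-- ===== SOURCE A (Python) =====
-- def _pick_best_table(tables: list[str], preferred_exact: list[str], soft_match: list[str]) -> str:
--     """Pick core CRM table names first, avoiding note/audit tables when possible."""
--     if not tables:
--         return preferred_exact[0].title()
--
--     lowered = {t.lower(): t for t in tables}
--
--     # 1) Exact preferred table names first (e.g., "Leads" over "Lead Notes")
--     for name in preferred_exact:
--         if name.lower() in lowered:
--             return lowered[name.lower()]
--
--     # 2) Soft match but avoid note/history/log helper tables
--     for t in tables:
--         lt = t.lower()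
--         if any(tok in lt for tok in soft_match) and not any(bad in lt for bad in ("note", "history", "log")):
--             return t
--
--     # 3) Last resort soft match
--     for t in tables:
--         lt = t.lower()
--         if any(tok in lt for tok in soft_match):
--             return t
--
--     return tables[0]
-- ===== SOURCE B (Python) =====
-- def _pick_best_table(tables: list[str], preferred_exact: list[str], soft_match: list[str]) -> str:
--     """Pick core CRM table names first, avoiding note/audit tables when possible."""
--     if not tables:
--         return preferred_exact[0].title()
--
--     lowered = {t.lower(): t for t in tables}
--
--     for name in preferred_exact:
--         if name.lower() in lowered:
--             return lowered[name.lower()]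
--
--     # single pass: first soft match without a bad token, and first soft match at all
--     best = None
--     any_match = None
--     for t in tables:
--         lt = t.lower()
--         if any(tok in lt for tok in soft_match):
--             if any_match is None:
--                 any_match = t
--             if best is None and not any(bad in lt for bad in ("note", "history", "log")):
--                 best = t
--     if best is not None:
--         return best
--     if any_match is not None:
--         return any_match
--     return tables[0]
-- ===== Notes on version B (the rewrite author's own statement) =====
-- stated objective: simpler
-- what changed: The two separate soft-match scans over tables are fused into one single pass that records the first soft match without a note/history/log token and the first soft match at all; the empty guard, the exact-preference dict loop and the tables[0] fallback stay unchanged.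
import Mathlib
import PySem

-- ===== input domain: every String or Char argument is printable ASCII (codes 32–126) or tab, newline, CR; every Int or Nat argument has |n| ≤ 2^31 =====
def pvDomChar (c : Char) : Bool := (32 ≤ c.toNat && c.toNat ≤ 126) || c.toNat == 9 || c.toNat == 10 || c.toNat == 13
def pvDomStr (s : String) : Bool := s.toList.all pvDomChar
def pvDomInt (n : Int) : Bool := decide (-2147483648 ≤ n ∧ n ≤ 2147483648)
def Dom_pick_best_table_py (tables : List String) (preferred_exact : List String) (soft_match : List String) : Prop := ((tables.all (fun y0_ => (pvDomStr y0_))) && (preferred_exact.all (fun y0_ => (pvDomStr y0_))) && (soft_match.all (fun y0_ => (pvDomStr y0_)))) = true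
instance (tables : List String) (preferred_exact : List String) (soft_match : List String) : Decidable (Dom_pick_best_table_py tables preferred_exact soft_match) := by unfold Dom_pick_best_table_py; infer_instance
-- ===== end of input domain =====

-- B replaces A's two separate soft-match scans over `tables` with one single pass that
-- records the first good (no note/history/log) soft match and the first soft match at all
-- (objective: simpler). The empty guard, the lowered-dict exact-preference loop and the
-- tables[0] fallback are unchanged.

-- ===== SHARED HELPERS (code that is literally identical in both Pythons) =====

-- hand port of str.title(), exact on the ASCII domain: a letter starts upper-cased after a
-- non-letter (non-cased) character, lower-cased after a letter.
def pvTitleChars : List Char → Bool → List Char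
  | [], _ => []
  | c :: rest, prevCased =>
      if PySem.Chars.isalpha c then
        (if prevCased then PySem.Chars.lowerChar c else PySem.Chars.upperChar c)
          :: pvTitleChars rest true
      else
        c :: pvTitleChars rest false

def pvTitle (s : String) : String := String.mk (pvTitleChars s.toList false)

-- {t.lower(): t for t in tables}
def pvLowered (tables : List String) : PySem.Dict String String :=
  tables.foldl (fun d t => d.insert (PySem.Str.lower t) t) PySem.Dict.empty

-- the exact-preference loop: first name whose .lower() is a key of lowered
def pvExactLoop (d : PySem.Dict String String) : List String → Option String
  | [] => none
  | name :: rest =>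
      match d.get? (PySem.Str.lower name) with
      | some v => some v
      | none => pvExactLoop d rest

-- any(tok in lt for tok in soft_match)
def pvSoftHit (soft_match : List String) (lt : String) : Bool :=
  soft_match.any (fun tok => PySem.Str.isIn tok lt)

-- any(bad in lt for bad in ("note", "history", "log"))
def pvBadHit (lt : String) : Bool :=
  ["note", "history", "log"].any (fun bad => PySem.Str.isIn bad lt)

-- ===== PORT A =====

-- loop 2 of A: first soft match avoiding note/history/log
def pvGoodLoop (soft_match : List String) : List String → Option String
  | [] => none
  | t :: rest =>
      let lt := PySem.Str.lower t
      if pvSoftHit soft_match lt && !pvBadHit lt then some t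
      else pvGoodLoop soft_match rest

-- loop 3 of A: first soft match at all
def pvAnyLoop (soft_match : List String) : List String → Option String
  | [] => none
  | t :: rest =>
      let lt := PySem.Str.lower t
      if pvSoftHit soft_match lt then some t
      else pvAnyLoop soft_match rest

def pick_best_table_py (tables : List String) (preferred_exact : List String) (soft_match : List String) : String :=
  match tables with
  | [] =>
      -- preferred_exact[0] raises IndexError on []; excluded by Pre_
      match preferred_exact with
      | [] => ""
      | p :: _ => pvTitle p
  | t0 :: _ =>
      match pvExactLoop (pvLowered tables) preferred_exact with
      | some v => v
      | none =>
          match pvGoodLoop soft_match tables with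
          | some t => t
          | none =>
              match pvAnyLoop soft_match tables with
              | some t => t
              | none => t0

-- ===== PORT B =====

-- B's single pass: (best, any_match) accumulators, only the FIRST hit of each kind sticks
def pvAltLoop (soft_match : List String) :
    List String → Option String → Option String → Option String × Option String
  | [], best, anyM => (best, anyM)
  | t :: rest, best, anyM =>
      let lt := PySem.Str.lower t
      if pvSoftHit soft_match lt then
        let anyM' := if anyM.isNone then some t else anyM
        let best' := if best.isNone && !pvBadHit lt then some t else best
        pvAltLoop soft_match rest best' anyM'
      else
        pvAltLoop soft_match rest best anyM

def pick_best_table_py_alt (tables : List String) (preferred_exact : List String) (soft_match : List String) : String :=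
  match tables with
  | [] =>
      match preferred_exact with
      | [] => ""
      | p :: _ => pvTitle p
  | t0 :: _ =>
      match pvExactLoop (pvLowered tables) preferred_exact with
      | some v => v
      | none =>
          match pvAltLoop soft_match tables none none with
          | (some b, _) => b
          | (none, some a) => a
          | (none, none) => t0

-- ===== PRECONDITION & SPEC =====
-- Pre_ excludes only the inputs where A raises IndexError: tables and preferred_exact both empty.
def Pre_pick_best_table_py (tables : List String) (preferred_exact : List String) (soft_match : List String) : Prop :=
  tables ≠ [] ∨ preferred_exact ≠ []
instance (tables : List String) (preferred_exact : List String) (soft_match : List String) : Decidable (Pre_pick_best_table_py tables preferred_exact soft_match) := by unfold Pre_pick_best_table_py; infer_instance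

def pvWitness_pick_best_table_py : List String × List String × List String :=
  (["Lead Notes", "Leads"], ["Accounts"], ["lead"])

def Spec_pick_best_table_py (tables : List String) (preferred_exact : List String) (soft_match : List String) (out : String) : Prop := out = pick_best_table_py_alt tables preferred_exact soft_match
instance (tables : List String) (preferred_exact : List String) (soft_match : List String) (out : String) : Decidable (Spec_pick_best_table_py tables preferred_exact soft_match out) := by unfold Spec_pick_best_table_py; infer_instance

-- ===== CLAIM (what is proved, stated in full; the proofs are below) =====
def Claim_equal_pick_best_table_py : Prop := ∀ (tables : List String) (preferred_exact : List String) (soft_match : List String), Dom_pick_best_table_py tables preferred_exact soft_match → Pre_pick_best_table_py tables preferred_exact soft_match → Spec_pick_best_table_py tables preferred_exact soft_match (pick_best_table_py tables preferred_exact soft_match)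

-- ===== LEMMAS AND PROOFS =====

-- the single pass with accumulators computes what A's two scans compute
theorem pvAltLoop_spec (soft_match : List String) (ts : List String)
    (best anyM : Option String) :
    pvAltLoop soft_match ts best anyM =
      ((best.orElse fun _ => pvGoodLoop soft_match ts),
       (anyM.orElse fun _ => pvAnyLoop soft_match ts)) := by
  induction ts generalizing best anyM with
  | nil => simp [pvAltLoop, pvGoodLoop, pvAnyLoop]
  | cons t rest ih =>
      simp only [pvAltLoop, pvGoodLoop, pvAnyLoop]
      by_cases hs : pvSoftHit soft_match (PySem.Str.lower t) = true
      · simp only [hs, if_true, Bool.true_and, ih]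
        cases best <;> cases anyM <;>
          by_cases hb : pvBadHit (PySem.Str.lower t) = true <;>
            simp [hb, Option.orElse]
      · simp only [Bool.not_eq_true] at hs
        simp [hs, ih]

theorem pick_best_table_py_eq (tables preferred_exact soft_match : List String)
    (h : Pre_pick_best_table_py tables preferred_exact soft_match) :
    pick_best_table_py tables preferred_exact soft_match
      = pick_best_table_py_alt tables preferred_exact soft_match := by
  cases tables with
  | nil => rfl
  | cons t0 rest =>
      simp only [pick_best_table_py, pick_best_table_py_alt,
        pvAltLoop_spec, Option.orElse]
      cases pvExactLoop (pvLowered (t0 :: rest)) preferred_exact with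
      | some v => rfl
      | none =>
          cases hg : pvGoodLoop soft_match (t0 :: rest) <;>
            cases ha : pvAnyLoop soft_match (t0 :: rest) <;> simp

-- ===== VERDICT (by name: the statement is the Claim_ definition above) =====
theorem pick_best_table_py_spec : Claim_equal_pick_best_table_py := by
  intro tables preferred_exact soft_match _ hpre
  exact pick_best_table_py_eq tables preferred_exact soft_match hpre
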